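-- pv_equiv track=rewrite | github.com/rogue-meow/vkflow | vkflow/commands/parsing/cutters.py | _extract_named_value
-- ===== SOURCE A (Python) =====
-- def _extract_named_value(text: str) -> tuple[str, str]:
--     """Извлечь значение из текста, поддерживая кавычки и экранирование."""
--     text = text.lstrip()
--     if not text:
--         return "", ""
--
--     if text[0] in ('"', "'"):
--         quote = text[0]
--         i = 1
--         while i < len(text):
--             if text[i] == "\\" and i + 1 < len(text):
--                 i += 2
--                 continue
--             if text[i] == quote:
--                 value = text[1:i].replace(f"\\{quote}", quote).replace("\\\\", "\\")
--                 return value, text[i + 1 :]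
--             i += 1
--
--     parts = text.split(maxsplit=1)
--     return parts[0], parts[1] if len(parts) > 1 else ""
-- ===== SOURCE B (Python) =====
-- def _extract_named_value(text: str) -> tuple[str, str]:
--     """Извлечь значение из текста, поддерживая кавычки и экранирование."""
--     text = text.lstrip()
--     if not text:
--         return "", ""
--
--     if text[0] in ('"', "'"):
--         quote = text[0]
--         buf = []
--         i = 1
--         while i < len(text):
--             c = text[i]
--             if c == "\\":
--                 if i + 1 == len(text):
--                     break  # lone trailing backslash: unterminated, fall through
--                 d = text[i + 1]
--                 if d == quote or d == "\\":
--                     buf.append(d)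
--                 else:
--                     buf.append(c)
--                     buf.append(d)
--                 i += 2
--             elif c == quote:
--                 return "".join(buf), text[i + 1:]
--             else:
--                 buf.append(c)
--                 i += 1
--
--     parts = text.split(maxsplit=1)
--     return parts[0], parts[1] if len(parts) > 1 else ""
-- ===== Notes on version B (the rewrite author's own statement) =====
-- stated objective: alternative
-- what changed: The quoted branch no longer scans for the closing-quote index and then slices plus runs two .replace passes; B decodes the value in a single pass with a result buffer, handling \quote and \\ escapes in place and falling through to split(maxsplit=1) when no closing quote is found.
import Mathlib
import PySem

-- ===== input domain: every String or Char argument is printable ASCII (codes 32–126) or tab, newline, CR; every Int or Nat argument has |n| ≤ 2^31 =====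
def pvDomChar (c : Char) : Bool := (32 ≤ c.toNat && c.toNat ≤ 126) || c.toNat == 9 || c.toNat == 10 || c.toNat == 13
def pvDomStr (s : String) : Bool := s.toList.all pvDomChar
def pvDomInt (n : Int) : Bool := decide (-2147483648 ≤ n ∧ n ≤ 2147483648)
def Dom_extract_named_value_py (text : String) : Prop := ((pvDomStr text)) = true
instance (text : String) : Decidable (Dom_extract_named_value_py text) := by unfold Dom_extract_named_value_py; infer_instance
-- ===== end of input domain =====

-- B replaces A's quoted-branch scan-then-slice-then-two-replaces with a single-pass decoder
-- carrying a result buffer (objective: alternative decomposition, same asymptotic cost).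

-- shared exact port of Python's whitespace `s.split(maxsplit=1)` followed by the
-- `parts[0], parts[1] if len(parts) > 1 else ""` selection; both Pythons call this builtin
-- on a nonempty string, where it is exact (leading whitespace run skipped, first token,
-- then the separating whitespace run consumed; empty remainder gives "").
def pvSplitMax1 (cs : List Char) : String × String :=
  let cs1 := cs.dropWhile PySem.Chars.isspace
  let tok := cs1.takeWhile (fun ch => !PySem.Chars.isspace ch)
  let rest := (cs1.dropWhile (fun ch => !PySem.Chars.isspace ch)).dropWhile PySem.Chars.isspace
  (String.ofList tok, String.ofList rest)

-- ===== PORT A =====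
-- A's while loop over the index i; text[1:i] = (cs.take i).drop 1 (exact here since 1 ≤ i),
-- text[i+1:] = cs.drop (i+1); the two .replace calls are PySem.Chars.replace.
def pvA_loop (quote : Char) (cs : List Char) (i : Nat) : Option (String × String) :=
  if h : i < cs.length then
    if cs[i] = '\\' ∧ i + 1 < cs.length then
      pvA_loop quote cs (i + 2)
    else if cs[i] = quote then
      some (String.ofList (PySem.Chars.replace
              (PySem.Chars.replace ((cs.take i).drop 1) ['\\', quote] [quote])
              ['\\', '\\'] ['\\']),
            String.ofList (cs.drop (i + 1)))
    else
      pvA_loop quote cs (i + 1)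
  else none
termination_by cs.length - i


def extract_named_value_py (text : String) : String × String :=
  match PySem.Chars.lstrip text.toList with
  | [] => ("", "")
  | c :: rest =>
    if c = '"' ∨ c = '\'' then
      match pvA_loop c (c :: rest) 1 with
      | some out => out
      | none => pvSplitMax1 (c :: rest)
    else pvSplitMax1 (c :: rest)

-- ===== PORT B =====
-- B's single-pass decoder: walks the characters after the opening quote with a buffer acc;
-- none = no closing quote was found (fall through to the split fallback).
def pvB_decode (quote : Char) (acc : List Char) (cs : List Char) : Option (String × String) :=
  match cs with
  | [] => none
  | c :: rest =>
    if c = '\\' then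
      match rest with
      | [] => none
      | d :: rest' =>
        pvB_decode quote
          (acc ++ (if d = quote then [d] else if d = '\\' then ['\\'] else ['\\', d])) rest'
    else if c = quote then some (String.ofList acc, String.ofList rest)
    else pvB_decode quote (acc ++ [c]) rest


def extract_named_value_py_alt (text : String) : String × String :=
  match PySem.Chars.lstrip text.toList with
  | [] => ("", "")
  | c :: rest =>
    if c = '"' ∨ c = '\'' then
      match pvB_decode c [] rest with
      | some out => out
      | none => pvSplitMax1 (c :: rest)
    else pvSplitMax1 (c :: rest)

-- ===== PRECONDITION & SPEC =====
def Spec_extract_named_value_py (text : String) (out : String × String) : Prop := out = extract_named_value_py_alt text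
instance (text : String) (out : String × String) : Decidable (Spec_extract_named_value_py text out) := by unfold Spec_extract_named_value_py; infer_instance

-- ===== CLAIM (what is proved, stated in full; the proofs are below) =====
def Claim_equal_extract_named_value_py : Prop := ∀ (text : String), Dom_extract_named_value_py text → Spec_extract_named_value_py text (extract_named_value_py text)

-- ===== LEMMAS AND PROOFS =====

def pvWf (quote : Char) : List Char → Bool
  | [] => true
  | c :: t =>
    if c = '\\' then
      match t with
      | [] => false
      | _ :: t' => pvWf quote t'
    else decide (c ≠ quote) && pvWf quote t

def pvDec (quote : Char) : List Char → List Char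
  | [] => []
  | c :: t =>
    if c = '\\' then
      match t with
      | [] => ['\\']
      | d :: t' => (if d = quote then [d] else if d = '\\' then ['\\'] else ['\\', d]) ++ pvDec quote t'
    else c :: pvDec quote t

theorem pvWf_append (quote : Char) :
    ∀ xs ys, pvWf quote xs = true → pvWf quote ys = true → pvWf quote (xs ++ ys) = true := by
  intro xs
  induction xs using pvWf.induct with
  | case1 => intro ys _ h2; simpa
  | case2 => intro ys h1 _; rw [pvWf.eq_def] at h1; simp at h1
  | case3 d t' ih =>
      intro ys h1 h2
      rw [pvWf.eq_def] at h1; simp at h1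
      rw [List.cons_append, List.cons_append, pvWf]
      simpa using ih ys h1 h2
  | case4 c t hc ih =>
      intro ys h1 h2
      rw [pvWf.eq_def] at h1; simp [hc] at h1
      rw [List.cons_append, pvWf.eq_def]
      simp [hc, h1.1, ih ys h1.2 h2]

theorem pvDec_append (quote : Char) :
    ∀ xs ys, pvWf quote xs = true → pvDec quote (xs ++ ys) = pvDec quote xs ++ pvDec quote ys := by
  intro xs
  induction xs using pvWf.induct with
  | case1 => intro ys _; simp [pvDec]
  | case2 => intro ys h1; rw [pvWf.eq_def] at h1; simp at h1
  | case3 d t' ih =>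
      intro ys h1
      rw [pvWf.eq_def] at h1; simp at h1
      rw [List.cons_append, List.cons_append, pvDec, pvDec]
      simp [ih ys h1]
  | case4 c t hc ih =>
      intro ys h1
      rw [pvWf.eq_def] at h1; simp [hc] at h1
      rw [List.cons_append, pvDec.eq_def (quote := quote) (c :: (t ++ ys)), pvDec.eq_def (quote := quote) (c :: t)]
      simp [hc, ih ys h1.2]

def pvRep2p (a b : Char) (new : List Char) : List Char → List Char
  | [] => []
  | c :: t =>
    match t with
    | [] => [c]
    | d :: t' => if c = a ∧ d = b then new ++ pvRep2p a b new t' else c :: pvRep2p a b new (d :: t')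

theorem isPrefixOf2 (a b c : Char) (t : List Char) :
    List.isPrefixOf [a, b] (c :: t) =
      match t with | [] => false | d :: _ => (a = c ∧ b = d : Bool) := by
  cases t with
  | nil => simp [List.isPrefixOf]
  | cons d t' => simp [List.isPrefixOf, Bool.beq_eq_decide_eq]

theorem pvRep2p_go (a b : Char) (new : List Char) :
    ∀ (fuel : Nat) (l acc : List Char), l.length ≤ fuel →
      PySem.Chars.replace.go [a, b] new fuel l acc = acc.reverse ++ pvRep2p a b new l := by
  intro fuel
  induction fuel with
  | zero => intro l acc h
            have : l = [] := by cases l <;> simp_all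
            subst this; simp [PySem.Chars.replace.go, pvRep2p]
  | succ n ih =>
    intro l acc h
    match l with
    | [] => simp [PySem.Chars.replace.go, pvRep2p]
    | c :: t =>
      rw [PySem.Chars.replace.go, isPrefixOf2]
      match t with
      | [] => simp [ih [] (c :: acc) (by simp), pvRep2p]
      | d :: t' =>
        by_cases hab : a = c ∧ b = d
        · have hlen : t'.length ≤ n := by simp at h; omega
          obtain ⟨h1, h2⟩ := hab; subst h1; subst h2
          rw [if_pos (by simp)]
          rw [show List.drop [a,b].length (a :: b :: t') = t' from rfl]
          rw [ih t' (new.reverse ++ acc) hlen]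
          rw [show pvRep2p a b new (a :: b :: t') = new ++ pvRep2p a b new t' by
            rw [pvRep2p]; simp]
          simp
        · have hlen : (d :: t').length ≤ n := by simp at h; simp; omega
          have hab' : ¬ (c = a ∧ d = b) := fun ⟨h1, h2⟩ => hab ⟨h1.symm, h2.symm⟩
          simp [hab, ih (d :: t') (c :: acc) hlen, pvRep2p, hab']

theorem pvReplace_eq_rep2p (a b : Char) (new : List Char) (s : List Char) :
    PySem.Chars.replace s [a, b] new = pvRep2p a b new s := by
  simp [PySem.Chars.replace, pvRep2p_go a b new s.length s [] le_rfl]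

theorem pvRep2p_cons_ne (a b c : Char) (new l : List Char) (h : c ≠ a) :
    pvRep2p a b new (c :: l) = c :: pvRep2p a b new l := by
  cases l with
  | nil => simp [pvRep2p]
  | cons d t' => rw [pvRep2p, if_neg (by exact fun hh => h hh.1)]

theorem pvRep2p_bs (quote : Char) (hq : quote ≠ '\\') (t : List Char) (hw : pvWf quote t = true) :
    pvRep2p '\\' quote [quote] ('\\' :: t) = '\\' :: pvRep2p '\\' quote [quote] t := by
  cases t with
  | nil => simp [pvRep2p]
  | cons e u =>
    have he : e ≠ quote := by
      by_cases hb : e = '\\'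
      · subst hb; exact fun h => hq h.symm
      · rw [pvWf.eq_def] at hw; simp [hb] at hw; exact hw.1
    rw [pvRep2p, if_neg (by exact fun hh => he hh.2)]

theorem pvChain_eq_dec (quote : Char) (hq : quote ≠ '\\') :
    ∀ xs, pvWf quote xs = true →
      pvRep2p '\\' '\\' ['\\'] (pvRep2p '\\' quote [quote] xs) = pvDec quote xs := by
  intro xs
  induction xs using pvWf.induct with
  | case1 => intro _; simp [pvRep2p, pvDec]
  | case2 => intro h1; rw [pvWf.eq_def] at h1; simp at h1
  | case3 d t' ih =>
    intro h1
    rw [pvWf.eq_def] at h1; simp at h1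
    by_cases hdq : d = quote
    · rw [pvRep2p, if_pos ⟨rfl, hdq⟩]
      rw [show ([quote] ++ pvRep2p '\\' quote [quote] t') = quote :: pvRep2p '\\' quote [quote] t' from rfl]
      rw [pvRep2p_cons_ne _ _ _ _ _ hq, ih h1]
      conv_rhs => rw [pvDec.eq_def]
      simp [hdq]
    · by_cases hdb : d = '\\'
      · subst hdb
        rw [pvRep2p, if_neg (by exact fun hh => hdq hh.2)]
        rw [pvRep2p_bs quote hq t' h1]
        rw [pvRep2p, if_pos ⟨rfl, rfl⟩, ih h1]
        conv_rhs => rw [pvDec.eq_def]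
        simp [Ne.symm hq]
      · rw [pvRep2p, if_neg (by exact fun hh => hdq hh.2)]
        rw [pvRep2p_cons_ne _ _ _ _ _ hdb]
        rw [pvRep2p, if_neg (by exact fun hh => hdb hh.2)]
        rw [pvRep2p_cons_ne _ _ _ _ _ hdb, ih h1]
        conv_rhs => rw [pvDec.eq_def]
        simp [hdq, hdb]
  | case4 c t hc ih =>
    intro h1
    rw [pvWf.eq_def] at h1; simp [hc] at h1
    rw [pvRep2p_cons_ne _ _ _ _ _ hc, pvRep2p_cons_ne _ _ _ _ _ hc, ih h1.2]
    conv_rhs => rw [pvDec.eq_def]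
    simp [hc]

theorem pvA_loop_none (quote : Char) (cs : List Char) (i : Nat) (h : cs.length ≤ i) :
    pvA_loop quote cs i = none := by
  rw [pvA_loop, dif_neg (by omega)]

theorem pvWf_single (quote c : Char) (h1 : c ≠ '\\') (h2 : c ≠ quote) : pvWf quote [c] = true := by
  rw [pvWf.eq_def]; simp [h1, h2, pvWf]

theorem pvWf_pair (quote d : Char) : pvWf quote ['\\', d] = true := by
  rw [pvWf.eq_def]; simp [pvWf]

theorem pvDec_single (quote c : Char) (h1 : c ≠ '\\') : pvDec quote [c] = [c] := by
  rw [pvDec.eq_def]; simp [h1, pvDec]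

theorem pvDec_pair (quote d : Char) :
    pvDec quote ['\\', d] = (if d = quote then [d] else if d = '\\' then ['\\'] else ['\\', d]) := by
  rw [pvDec.eq_def]; simp [pvDec]

theorem pvTake_succ_get {α} (l : List α) (n : Nat) (h : n < l.length) :
    l.take (n+1) = l.take n ++ [l[n]] := by
  rw [List.take_add_one, List.getElem?_eq_getElem h]; rfl

theorem pvB_decode_bs_nil (quote : Char) (acc : List Char) :
    pvB_decode quote acc ['\\'] = none := rfl

theorem pvB_decode_other (quote : Char) (acc : List Char) (c : Char) (rest : List Char) (hbs : c ≠ '\\') :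
    pvB_decode quote acc (c :: rest) =
      (if c = quote then some (String.ofList acc, String.ofList rest)
       else pvB_decode quote (acc ++ [c]) rest) := by
  rw [pvB_decode.eq_def]; simp [hbs]

theorem pvB_decode_bs' (quote : Char) (acc : List Char) (d : Char) (rest' : List Char) :
    pvB_decode quote acc ('\\' :: d :: rest') =
      pvB_decode quote (acc ++ (if d = quote then [d] else if d = '\\' then ['\\'] else ['\\', d])) rest' := by
  rw [pvB_decode]; simp

theorem pvLoop_eq (quote : Char) (hq : quote ≠ '\\') (c : Char) (rest : List Char) :
    ∀ j, pvWf quote (rest.take j) = true →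
      pvA_loop quote (c :: rest) (j + 1) =
        pvB_decode quote (pvDec quote (rest.take j)) (rest.drop j) := by
  suffices H : ∀ n j, rest.length - j ≤ n → pvWf quote (rest.take j) = true →
      pvA_loop quote (c :: rest) (j + 1) =
        pvB_decode quote (pvDec quote (rest.take j)) (rest.drop j) by
    exact fun j hw => H rest.length j (by omega) hw
  intro n
  induction n with
  | zero =>
    intro j hj hw
    rw [List.drop_eq_nil_of_le (by omega), pvB_decode]
    exact pvA_loop_none quote (c :: rest) (j+1) (by simp; omega)
  | succ n ih =>
    intro j hj hw
    by_cases hin : j < rest.length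
    · rw [List.drop_eq_getElem_cons hin]
      have hidx : (c :: rest)[j + 1]'(by simp; omega) = rest[j] := by simp
      by_cases hbs : rest[j] = '\\'
      · by_cases hroom : j + 1 < rest.length
        · -- escaped pair
          rw [pvA_loop, dif_pos (by simp; omega), if_pos (by constructor <;> simp [hbs]; omega)]
          rw [List.drop_eq_getElem_cons hroom, hbs, pvB_decode_bs']
          have hstep : pvA_loop quote (c :: rest) (j + 1 + 2) =
              pvB_decode quote (pvDec quote (rest.take (j+2))) (rest.drop (j+2)) := by
            have hw2 : pvWf quote (rest.take (j+2)) = true := by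
              rw [pvTake_succ_get rest (j+1) hroom, pvTake_succ_get rest j hin, List.append_assoc]
              exact pvWf_append quote _ _ hw (by simpa [hbs] using pvWf_pair quote rest[j+1])
            simpa using ih (j + 2) (by omega) hw2
          rw [show j + 1 + 2 = j + 2 + 1 from rfl] at hstep
          rw [hstep]
          congr 1
          rw [pvTake_succ_get rest (j+1) hroom, pvTake_succ_get rest j hin, List.append_assoc]
          rw [pvDec_append quote _ _ hw]
          simp [hbs, pvDec_pair]
        · -- lone trailing backslash
          rw [pvA_loop, dif_pos (by simp; omega), if_neg (by simp [hidx]; omega),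
              if_neg (by rw [hidx, hbs]; exact Ne.symm hq)]
          rw [pvA_loop_none quote (c :: rest) (j + 1 + 1) (by simp; omega)]
          rw [List.drop_eq_nil_of_le (by omega), hbs, pvB_decode_bs_nil]
      · by_cases hcl : rest[j] = quote
        · -- closing quote
          rw [pvA_loop, dif_pos (by simp; omega), if_neg (by simp [hidx, hbs]), if_pos (by rw [hidx, hcl])]
          rw [pvB_decode_other quote _ _ _ hbs, if_pos hcl]
          have hsl : ((c :: rest).take (j + 1)).drop 1 = rest.take j := by simp
          rw [hsl, pvReplace_eq_rep2p, pvReplace_eq_rep2p, pvChain_eq_dec quote hq _ hw]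
          simp
        · -- ordinary char
          rw [pvA_loop, dif_pos (by simp; omega), if_neg (by simp [hidx, hbs]), if_neg (by rw [hidx]; exact hcl)]
          rw [pvB_decode_other quote _ _ _ hbs, if_neg hcl]
          have hstep : pvA_loop quote (c :: rest) (j + 1 + 1) =
              pvB_decode quote (pvDec quote (rest.take (j+1))) (rest.drop (j+1)) := by
            have hw2 : pvWf quote (rest.take (j+1)) = true := by
              rw [pvTake_succ_get rest j hin]
              exact pvWf_append quote _ _ hw (pvWf_single quote _ hbs hcl)
            exact ih (j + 1) (by omega) hw2
          rw [hstep]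
          congr 1
          rw [pvTake_succ_get rest j hin, pvDec_append quote _ _ hw, pvDec_single quote _ hbs]
    · rw [List.drop_eq_nil_of_le (by omega), pvB_decode]
      exact pvA_loop_none quote (c :: rest) (j+1) (by simp; omega)

-- ===== VERDICT (by name: the statement is the Claim_ definition above) =====
theorem extract_named_value_py_spec : Claim_equal_extract_named_value_py := by
  intro text _
  unfold Spec_extract_named_value_py extract_named_value_py extract_named_value_py_alt
  cases h : PySem.Chars.lstrip text.toList with
  | nil => rfl
  | cons c rest =>
    have goal' :
        (if c = '"' ∨ c = '\'' then
          (match pvA_loop c (c :: rest) 1 with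
           | some out => out
           | none => pvSplitMax1 (c :: rest))
         else pvSplitMax1 (c :: rest)) =
        (if c = '"' ∨ c = '\'' then
          (match pvB_decode c [] rest with
           | some out => out
           | none => pvSplitMax1 (c :: rest))
         else pvSplitMax1 (c :: rest)) := by
      by_cases hquote : c = '"' ∨ c = '\''
      · have hq : c ≠ '\\' := by rcases hquote with h | h <;> subst h <;> decide
        have hl := pvLoop_eq c hq c rest 0 (by rw [List.take_zero, pvWf])
        rw [List.take_zero, List.drop_zero] at hl
        rw [show pvDec c [] = [] from by rw [pvDec]] at hl
        rw [if_pos hquote, if_pos hquote, hl]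
      · rw [if_neg hquote, if_neg hquote]
    exact goal'
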